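-- pv_equiv track=rewrite | github.com/ludwings0330/algo | programmers/문제2.py | solution
-- ===== SOURCE A (Python) =====
-- def solution(words):
--     answer = 0
--     graph = {}
--
--     for word in words:
--         if word[0] not in graph:
--             graph[word[0]] = [dict(), 1]
--         else:
--             graph[word[0]][1] += 1
--         node = graph[word[0]]
--
--         for i in range(1, len(word)):
--             if word[i] not in node[0]:
--                 node[0][word[i]] = [dict(), 1]
--             else:
--                 node[0][word[i]][1] += 1
--             node = node[0][word[i]]
--
--     for word in words:
--         node = graph[word[0]]
--         answer += 1
--         if node[1] == 1:
--             continue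
--         for i in range(1, len(word)):
--             if node[0][word[i]][1] == 1:
--                 answer += 1
--                 break
--             node = node[0][word[i]]
--             answer += 1
--     return answer
-- ===== SOURCE B (Python) =====
-- def _lcp(a, b):
--     if a and b and a[0] == b[0]:
--         return 1 + _lcp(a[1:], b[1:])
--     return 0
--
--
-- def solution(words):
--     total = 0
--     for i in range(len(words)):
--         w = words[i]
--         c = w[0]  # the first letter is always typed
--         m = 0
--         for v in words[:i] + words[i + 1:]:
--             if v and v[0] == c:  # only words sharing the first letter share a prefix
--                 m = max(m, 1 + _lcp(w[1:], v[1:]))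
--         total += min(len(w), m + 1)
--     return total
-- ===== Notes on version B (the rewrite author's own statement) =====
-- stated objective: alternative
-- what changed: Replaces A's mutable counting trie (build per-prefix counts, then re-walk each word until its prefix count drops to 1) by a direct per-word closed form: each word costs min(len(word), M+1) keystrokes, where M is the maximum longest-common-prefix length with any other word, computed pairwise (comparing the first letter, then a recursive LCP on the tails).
import Mathlib
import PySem

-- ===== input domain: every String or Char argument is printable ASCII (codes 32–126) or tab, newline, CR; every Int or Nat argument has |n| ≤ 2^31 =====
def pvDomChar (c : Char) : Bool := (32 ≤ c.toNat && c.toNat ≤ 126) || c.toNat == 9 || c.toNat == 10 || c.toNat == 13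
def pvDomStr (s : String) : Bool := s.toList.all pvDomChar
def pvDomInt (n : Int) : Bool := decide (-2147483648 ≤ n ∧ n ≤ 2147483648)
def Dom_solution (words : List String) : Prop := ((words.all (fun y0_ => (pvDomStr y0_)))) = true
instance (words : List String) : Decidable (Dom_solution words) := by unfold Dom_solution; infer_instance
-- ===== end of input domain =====

-- B replaces A's counting trie by a direct per-word formula min(len w, M+1), M = max LCP with the other words (objective: alternative algorithm).

-- ===== PORT A =====
-- A's trie: a dict-of-dicts where each entry holds a count and its children.
-- Modelled as a sibling-list inductive (entry = char, count, children, next sibling),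
-- preserving Python's dict insertion order (new keys appended, updates in place).
inductive Children where
  | nil : Children
  | cons : Char → Int → Children → Children → Children
deriving Repr

def Children.find? : Children → Char → Option (Int × Children)
  | Children.nil, _ => none
  | Children.cons a n sub rest, c => if a = c then some (n, sub) else Children.find? rest c

-- new key appended at the end (Python dict insertion order)
def Children.pushNew : Children → Char → Int → Children → Children
  | Children.nil, c, n, sub => Children.cons c n sub Children.nil
  | Children.cons a m s r, c, n, sub => Children.cons a m s (Children.pushNew r c n sub)

-- existing key updated in place
def Children.setc : Children → Char → Int → Children → Children
  | Children.nil, _, _, _ => Children.nil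
  | Children.cons a m s r, c, n, sub =>
      if a = c then Children.cons a n sub r else Children.cons a m s (Children.setc r c n sub)

-- A's first loop body for one word: walk/extend the trie, bumping counts
def insertWord : List Char → Children → Children
  | [], cs => cs
  | c :: rest, cs =>
      match Children.find? cs c with
      | none => Children.pushNew cs c 1 (insertWord rest Children.nil)
      | some (n, sub) => Children.setc cs c (n + 1) (insertWord rest sub)

-- A's second loop body for one word: +1 per typed char, stop after a count-1 node.
-- The `none` branches are unreachable for words that were inserted (Python would
-- raise KeyError there); Python's IndexError on the empty word is excluded by Pre_.
def queryWord : Children → List Char → Int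
  | _, [] => 0
  | cs, c :: rest =>
      match Children.find? cs c with
      | none => 0
      | some (n, sub) => if n = 1 then 1 else 1 + queryWord sub rest

def solution (words : List String) : Int :=
  let graph := words.foldl (fun cs w => insertWord w.toList cs) Children.nil
  words.foldl (fun answer w => answer + queryWord graph w.toList) 0

-- ===== PORT B =====
-- _lcp: length of the longest common prefix of two strings (recursion on the
-- character lists; exact: Python a[0]==b[0] and a[1:] are head/tail of toList)
def lcpL : List Char → List Char → Int
  | a :: as, b :: bs => if a = b then 1 + lcpL as bs else 0
  | _, _ => 0

def lcpS (a b : String) : Int := lcpL a.toList b.toList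

def solution_alt (words : List String) : Int :=
  (PySem.List.pyRange 0 (PySem.List.len words) 1).foldl (fun total i =>
    let w := PySem.List.pyGetD words i ""
    total +
      match PySem.Str.pyGet? w 0 with  -- c = w[0]; none = IndexError, excluded by Pre_
      | none => 0
      | some c =>
        let others := PySem.List.slice words none (some i) ++ PySem.List.slice words (some (i + 1)) none
        let m := others.foldl (fun m v =>
          match PySem.Str.pyGet? v 0 with  -- 'if v and v[0] == c'
          | none => m
          | some d =>
            if d = c then
              max m (1 + lcpS (PySem.Str.slice w (some 1) none) (PySem.Str.slice v (some 1) none))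
            else m) 0
        min (PySem.Str.len w) (m + 1)) 0

-- ===== PRECONDITION & SPEC =====
-- Pre_ excludes lists containing an empty string: A raises IndexError on word[0] there.
def Pre_solution (words : List String) : Prop := ∀ w ∈ words, w ≠ ""
instance (words : List String) : Decidable (Pre_solution words) := by unfold Pre_solution; infer_instance
def pvWitness_solution : List String := (["go", "gone", "guild"])

def Spec_solution (words : List String) (out : Int) : Prop := out = solution_alt words
instance (words : List String) (out : Int) : Decidable (Spec_solution words out) := by unfold Spec_solution; infer_instance

-- ===== CLAIM (what is proved, stated in full; the proofs are below) =====
def Claim_equal_solution : Prop := ∀ (words : List String), Dom_solution words → Pre_solution words → Spec_solution words (solution words)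

-- ===== LEMMAS AND PROOFS =====

-- count, in a list of char-lists, of those having p as a prefix
def cntp (L : List (List Char)) (p : List Char) : Nat := L.countP (fun v => p.isPrefixOf v)

-- the tails of those members starting with c
def stripc (c : Char) (L : List (List Char)) : List (List Char) :=
  L.filterMap (fun v => match v with | [] => none | a :: t => if a = c then some t else none)

lemma cntp_strip (c : Char) (q : List Char) (L : List (List Char)) :
    cntp L (c :: q) = cntp (stripc c L) q := by
  induction L with
  | nil => rfl
  | cons v L ih =>
    cases v with
    | nil => simpa [cntp, stripc, List.countP_cons, List.isPrefixOf] using ih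
    | cons a t =>
      by_cases h : a = c
      · subst h
        simp only [cntp, stripc, List.filterMap_cons] at ih ⊢
        simp [List.countP_cons, List.isPrefixOf] at ih ⊢
        omega
      · have h' : ¬ c = a := fun e => h e.symm
        simpa [cntp, stripc, List.countP_cons, List.isPrefixOf, h, h'] using ih

lemma cntp_nil_prefix (L : List (List Char)) : cntp L [] = L.length := by
  simp [cntp, List.isPrefixOf]

-- count stored at the node reached from cs by the path c :: q
def cntAt : List Char → Char → Children → Int
  | [], c, cs =>
    match Children.find? cs c with
    | none => 0
    | some (n, _) => n
  | d :: q', c, cs =>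
    match Children.find? cs c with
    | none => 0
    | some (_, sub) => cntAt q' d sub

lemma cntAt_nil_find (cs : Children) (c : Char) (n : Int) (sub : Children)
    (h : Children.find? cs c = some (n, sub)) : cntAt [] c cs = n := by
  rw [cntAt, h]

lemma cntAt_cons_find (cs : Children) (c d : Char) (q : List Char) (n : Int) (sub : Children)
    (h : Children.find? cs c = some (n, sub)) : cntAt (d :: q) c cs = cntAt q d sub := by
  rw [cntAt, h]

lemma cntAt_find_none (cs : Children) (c : Char) (q : List Char)
    (h : Children.find? cs c = none) : cntAt q c cs = 0 := by
  cases q <;> rw [cntAt, h]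

lemma queryWord_cons_find (cs : Children) (c : Char) (rest : List Char) (n : Int) (sub : Children)
    (h : Children.find? cs c = some (n, sub)) :
    queryWord cs (c :: rest) = if n = 1 then 1 else 1 + queryWord sub rest := by
  rw [queryWord, h]

lemma find?_pushNew_self (cs : Children) (c : Char) (n : Int) (sub : Children)
    (h : Children.find? cs c = none) :
    Children.find? (Children.pushNew cs c n sub) c = some (n, sub) := by
  induction cs with
  | nil => simp [Children.pushNew, Children.find?]
  | cons a m s r ihs ihr =>
    by_cases hac : a = c
    · simp [Children.find?, hac] at h
    · simp only [Children.pushNew, Children.find?, if_neg hac] at h ⊢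
      exact ihr h

lemma find?_pushNew_ne (cs : Children) (c d : Char) (n : Int) (sub : Children)
    (h : ¬ d = c) :
    Children.find? (Children.pushNew cs c n sub) d = Children.find? cs d := by
  induction cs with
  | nil =>
    have h' : ¬ c = d := fun e => h e.symm
    simp [Children.pushNew, Children.find?, h']
  | cons a m s r ihs ihr =>
    by_cases had : a = d
    · simp [Children.pushNew, Children.find?, had]
    · simp only [Children.pushNew, Children.find?, if_neg had]
      exact ihr

lemma find?_setc_self (cs : Children) (c : Char) (n : Int) (sub : Children)
    (h : Children.find? cs c ≠ none) :
    Children.find? (Children.setc cs c n sub) c = some (n, sub) := by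
  induction cs with
  | nil => simp [Children.find?] at h
  | cons a m s r ihs ihr =>
    by_cases hac : a = c
    · simp [Children.setc, Children.find?, hac]
    · simp only [Children.setc, Children.find?, if_neg hac] at h ⊢
      exact ihr h

lemma find?_setc_ne (cs : Children) (c d : Char) (n : Int) (sub : Children)
    (h : ¬ d = c) :
    Children.find? (Children.setc cs c n sub) d = Children.find? cs d := by
  induction cs with
  | nil => simp [Children.setc]
  | cons a m s r ihs ihr =>
    have h' : ¬ c = d := fun e => h e.symm
    by_cases hac : a = c
    · have had : ¬ a = d := by rw [hac]; exact h'
      simp [Children.setc, Children.find?, hac, h']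
    · by_cases had : a = d
      · simp [Children.setc, Children.find?, had, h]
      · simp only [Children.setc, Children.find?, if_neg hac, if_neg had]
        exact ihr

-- one insertion bumps exactly the counts of the inserted word's prefixes
lemma cntAt_insertWord (v : List Char) : ∀ (cs : Children) (c : Char) (q : List Char),
    cntAt q c (insertWord v cs) = cntAt q c cs + (if (c :: q).isPrefixOf v then 1 else 0) := by
  induction v with
  | nil => intro cs c q; simp [insertWord, List.isPrefixOf]
  | cons a v' ih =>
    intro cs c q
    rw [insertWord]
    cases hf : Children.find? cs a with
    | none =>
      by_cases hca : c = a
      · subst hca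
        cases q with
        | nil =>
          rw [cntAt_nil_find _ _ _ _ (find?_pushNew_self _ _ _ _ hf), cntAt_find_none _ _ _ hf]
          simp [List.isPrefixOf]
        | cons d q' =>
          rw [cntAt_cons_find _ _ _ _ _ _ (find?_pushNew_self _ _ _ _ hf), ih,
            cntAt_find_none _ _ _ hf]
          simp [cntAt_find_none, Children.find?, List.isPrefixOf]
      · have h2 := find?_pushNew_ne cs a c 1 (insertWord v' Children.nil) hca
        have h3 : ((c :: q).isPrefixOf (a :: v')) = false := by
          simp [List.isPrefixOf]; intro e; exact absurd e hca
        rw [h3]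
        cases q with
        | nil => cases hfc : Children.find? cs c with
          | none => rw [cntAt_find_none _ _ _ (h2.trans hfc), cntAt_find_none _ _ _ hfc]; simp
          | some p =>
            rw [cntAt_nil_find _ _ _ _ (h2.trans hfc), cntAt_nil_find _ _ _ _ hfc]; simp
        | cons d q' => cases hfc : Children.find? cs c with
          | none => rw [cntAt_find_none _ _ _ (h2.trans hfc), cntAt_find_none _ _ _ hfc]; simp
          | some p =>
            rw [cntAt_cons_find _ _ _ _ _ _ (h2.trans hfc), cntAt_cons_find _ _ _ _ _ _ hfc]
            simp
    | some p =>
      obtain ⟨n, sub⟩ := p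
      have hset := find?_setc_self cs a (n + 1) (insertWord v' sub) (by rw [hf]; simp)
      by_cases hca : c = a
      · subst hca
        cases q with
        | nil =>
          rw [cntAt_nil_find _ _ _ _ hset, cntAt_nil_find _ _ _ _ hf]
          simp [List.isPrefixOf]
        | cons d q' =>
          rw [cntAt_cons_find _ _ _ _ _ _ hset, ih, cntAt_cons_find _ _ _ _ _ _ hf]
          simp [List.isPrefixOf]
      · have h2 := find?_setc_ne cs a c (n + 1) (insertWord v' sub) hca
        have h3 : ((c :: q).isPrefixOf (a :: v')) = false := by
          simp [List.isPrefixOf]; intro e; exact absurd e hca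
        rw [h3]
        cases q with
        | nil => cases hfc : Children.find? cs c with
          | none => rw [cntAt_find_none _ _ _ (h2.trans hfc), cntAt_find_none _ _ _ hfc]; simp
          | some p =>
            rw [cntAt_nil_find _ _ _ _ (h2.trans hfc), cntAt_nil_find _ _ _ _ hfc]; simp
        | cons d q' => cases hfc : Children.find? cs c with
          | none => rw [cntAt_find_none _ _ _ (h2.trans hfc), cntAt_find_none _ _ _ hfc]; simp
          | some p =>
            rw [cntAt_cons_find _ _ _ _ _ _ (h2.trans hfc), cntAt_cons_find _ _ _ _ _ _ hfc]
            simp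

lemma cntAt_build (ws : List String) : ∀ (cs0 : Children) (c : Char) (q : List Char),
    cntAt q c (ws.foldl (fun cs w => insertWord w.toList cs) cs0)
      = cntAt q c cs0 + (ws.countP (fun w => (c :: q).isPrefixOf w.toList) : Int) := by
  induction ws with
  | nil => intro cs0 c q; simp
  | cons w ws ih =>
    intro cs0 c q
    simp only [List.foldl_cons, List.countP_cons]
    rw [ih, cntAt_insertWord]
    split_ifs <;> push_cast <;> ring

lemma cntAt_nil' (q : List Char) (c : Char) : cntAt q c Children.nil = 0 :=
  cntAt_find_none _ _ _ rfl

-- B's per-word value, phrased as a recursion that follows the word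
def avRest : List Char → List (List Char) → Int
  | [], _ => 0
  | c :: rest, os => if stripc c os = [] then 1 else 1 + avRest rest (stripc c os)

-- A's query of one word against the trie equals avRest on the other words
lemma query_eq_avRest : ∀ (w : List Char) (os : List (List Char)) (cs : Children),
    (∀ (c : Char) (q : List Char), cntAt q c cs = (cntp (w :: os) (c :: q) : Int)) →
    queryWord cs w = avRest w os := by
  intro w
  induction w with
  | nil => intro os cs _; simp [queryWord, avRest]
  | cons c rest ih =>
    intro os cs H
    have h1 := H c []
    have hcnt : cntp ((c :: rest) :: os) [c] = 1 + (stripc c os).length := by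
      have h0 : List.countP (fun v => [c].isPrefixOf v) os = (stripc c os).length := by
        have h5 := cntp_strip c [] os
        rw [cntp_nil_prefix] at h5
        simpa [cntp] using h5
      simp [cntp, List.isPrefixOf]
      omega
    rw [hcnt] at h1
    cases hf : Children.find? cs c with
    | none =>
      exfalso
      rw [cntAt_find_none _ _ _ hf] at h1
      push_cast at h1
      omega
    | some p =>
      obtain ⟨n, sub⟩ := p
      rw [cntAt_nil_find _ _ _ _ hf] at h1
      rw [queryWord_cons_find _ _ _ _ _ hf]
      by_cases hs : stripc c os = []
      · have hn1 : n = 1 := by rw [h1, hs]; simp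
        rw [hn1, if_pos rfl, avRest, if_pos hs]
      · have hlen : 0 < (stripc c os).length := List.length_pos_iff.mpr hs
        have hne : ¬ n = 1 := by rw [h1]; push_cast; omega
        rw [if_neg hne, avRest, if_neg hs]
        congr 1
        apply ih
        intro d q
        have h4 := H c (d :: q)
        rw [cntAt_cons_find _ _ _ _ _ _ hf] at h4
        rw [h4, cntp_strip]
        have hst : stripc c ((c :: rest) :: os) = rest :: stripc c os := by
          simp [stripc]
        rw [hst]

-- the longest common prefix helper is nonnegative and bounded by the word length
lemma lcpL_nonneg : ∀ (w v : List Char), 0 ≤ lcpL w v := by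
  intro w
  induction w with
  | nil => intro v; cases v <;> simp [lcpL]
  | cons a as ih =>
    intro v
    cases v with
    | nil => simp [lcpL]
    | cons b bs =>
      rw [lcpL]
      split_ifs
      · have := ih bs; omega
      · omega

-- max of lcp with each member of os
def msup (w : List Char) (os : List (List Char)) : Int := (os.map (lcpL w)).foldr max 0

lemma msup_nil (w : List Char) : msup w [] = 0 := rfl

lemma msup_cons (w v : List Char) (os : List (List Char)) :
    msup w (v :: os) = max (lcpL w v) (msup w os) := rfl

lemma msup_nonneg (w : List Char) : ∀ os, 0 ≤ msup w os := by
  intro os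
  induction os with
  | nil => simp [msup_nil]
  | cons v os ih => rw [msup_cons]; exact le_max_of_le_right ih

lemma msup_strip (c : Char) (rest : List Char) : ∀ (os : List (List Char)),
    msup (c :: rest) os = if stripc c os = [] then 0 else 1 + msup rest (stripc c os) := by
  intro os
  induction os with
  | nil => simp [msup_nil, stripc]
  | cons v os ih =>
    cases v with
    | nil =>
      have hst : stripc c ([] :: os) = stripc c os := by simp [stripc]
      have hl : lcpL (c :: rest) [] = 0 := rfl
      rw [hst, msup_cons, hl, ih]
      have hnn := msup_nonneg rest (stripc c os)
      split_ifs with hh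
      · simp
      · rw [max_eq_right (by omega : (0 : Int) ≤ 1 + msup rest (stripc c os))]
    | cons a t =>
      by_cases h : a = c
      · subst h
        have hst : stripc a ((a :: t) :: os) = t :: stripc a os := by simp [stripc]
        have hl : lcpL (a :: rest) (a :: t) = 1 + lcpL rest t := by rw [lcpL]; simp
        rw [hst, msup_cons, hl, ih, msup_cons]
        have h6 := msup_nonneg rest (stripc a os)
        have h7 := lcpL_nonneg rest t
        rw [if_neg (List.cons_ne_nil _ _)]
        split_ifs with hh
        · rw [hh, msup_nil, max_eq_left (by omega : (0 : Int) ≤ 1 + lcpL rest t),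
            max_eq_left h7]
        · rw [← max_add_add_left]
      · have h' : ¬ c = a := fun e => h e.symm
        have hst : stripc c ((a :: t) :: os) = stripc c os := by simp [stripc, h]
        have hl : lcpL (c :: rest) (a :: t) = 0 := by rw [lcpL]; simp [h']
        rw [hst, msup_cons, hl, ih]
        have hnn := msup_nonneg rest (stripc c os)
        split_ifs with hh
        · simp
        · rw [max_eq_right (by omega : (0 : Int) ≤ 1 + msup rest (stripc c os))]

lemma avRest_eq (w : List Char) : ∀ os, avRest w os = min (w.length : Int) (msup w os + 1) := by
  induction w with
  | nil =>
    intro os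
    have := msup_nonneg ([] : List Char) os
    rw [show avRest [] os = 0 from rfl, eq_comm]
    simp only [List.length_nil, Nat.cast_zero]
    exact min_eq_left (by omega)
  | cons c rest ih =>
    intro os
    rw [avRest, msup_strip]
    by_cases hs : stripc c os = []
    · rw [if_pos hs, if_pos hs, eq_comm]
      simp only [List.length_cons]
      push_cast
      exact min_eq_right (by omega)
    · rw [if_neg hs, if_neg hs, ih]
      simp only [List.length_cons]
      push_cast
      rw [min_add_add_right]
      omega

lemma foldl_max_eq (l : List Int) : ∀ (a : Int), 0 ≤ a → l.foldl max a = max a (l.foldr max 0) := by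
  induction l with
  | nil => intro a ha; simp only [List.foldl_nil, List.foldr_nil]; rw [max_eq_left ha]
  | cons x l ih =>
    intro a ha
    simp only [List.foldl_cons, List.foldr_cons]
    rw [ih (max a x) (le_trans ha (le_max_left a x))]
    rw [max_assoc]

lemma toList_nil_eq_empty (w : String) (h : w.toList = []) : w = "" :=
  String.toList_eq_nil_iff.mp h

-- the first-letter-guarded inner loop of B computes the plain running max of lcpL
lemma guard_fold (c₀ : Char) (rest : List Char) (w : String) (hw : w.toList = c₀ :: rest) :
    ∀ (os : List String) (a : Int), 0 ≤ a →
    os.foldl (fun m v =>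
      match PySem.Str.pyGet? v 0 with
      | none => m
      | some d =>
        if d = c₀ then
          max m (1 + lcpS (PySem.Str.slice w (some 1) none) (PySem.Str.slice v (some 1) none))
        else m) a
    = os.foldl (fun m v => max m (lcpL w.toList v.toList)) a := by
  intro os
  induction os with
  | nil => intro a _; rfl
  | cons v os ih =>
    intro a ha
    simp only [List.foldl_cons]
    have hstep : (match PySem.Str.pyGet? v 0 with
        | none => a
        | some d =>
          if d = c₀ then
            max a (1 + lcpS (PySem.Str.slice w (some 1) none) (PySem.Str.slice v (some 1) none))
          else a) = max a (lcpL w.toList v.toList) := by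
      cases hv : v.toList with
      | nil =>
        have hg : PySem.Str.pyGet? v 0 = none := by
          simp [pysem, hv, PySem.List.pyGet?]
        rw [hg, hw]
        show a = max a (lcpL (c₀ :: rest) [])
        rw [show lcpL (c₀ :: rest) [] = 0 from rfl, max_eq_left ha]
      | cons d t =>
        have hg : PySem.Str.pyGet? v 0 = some d := by
          simp [pysem, hv, PySem.List.pyGet?, PySem.List.pyIdx?]
        rw [hg, hw]
        by_cases hd : d = c₀
        · subst hd
          have hsw : (PySem.Str.slice w (some 1) none).toList = rest := by
            simp [pysem, hw]
          have hsv : (PySem.Str.slice v (some 1) none).toList = t := by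
            simp [pysem, hv]
          show (if d = d then
              max a (1 + lcpS (PySem.Str.slice w (some 1) none) (PySem.Str.slice v (some 1) none))
            else a) = max a (lcpL (d :: rest) (d :: t))
          rw [if_pos rfl, lcpS, hsw, hsv]
          rw [show lcpL (d :: rest) (d :: t) = 1 + lcpL rest t from by rw [lcpL]; simp]
        · have hd' : ¬ c₀ = d := fun e => hd e.symm
          show (if d = c₀ then
              max a (1 + lcpS (PySem.Str.slice w (some 1) none) (PySem.Str.slice v (some 1) none))
            else a) = max a (lcpL (c₀ :: rest) (d :: t))
          rw [if_neg hd]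
          rw [show lcpL (c₀ :: rest) (d :: t) = 0 from by rw [lcpL]; simp [hd']]
          rw [max_eq_left ha]
    rw [hstep]
    exact ih (max a (lcpL w.toList v.toList)) (le_trans ha (le_max_left _ _))

-- the trie query for the word at index k equals B's formula for that index
lemma per_index (words : List String) (k : Nat) (hk : k < words.length) :
    queryWord (words.foldl (fun cs w => insertWord w.toList cs) Children.nil) (words[k].toList)
      = min (PySem.Str.len (words[k]))
          ((words.take k ++ words.drop (k + 1)).foldl
            (fun m v => max m (lcpL (words[k].toList) v.toList)) 0 + 1) := by
  have hsplit : words = words.take k ++ words[k] :: words.drop (k + 1) := by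
    conv_lhs => rw [← List.take_append_drop k words]
    rw [List.drop_eq_getElem_cons hk]
  set w := words[k] with hw
  set os := (words.take k ++ words.drop (k + 1)).map String.toList with hos
  have H : ∀ (c : Char) (q : List Char),
      cntAt q c (words.foldl (fun cs w => insertWord w.toList cs) Children.nil)
        = (cntp (w.toList :: os) (c :: q) : Int) := by
    intro c q
    rw [cntAt_build, cntAt_nil']
    have hc : words.countP (fun x => (c :: q).isPrefixOf x.toList)
        = cntp (w.toList :: os) (c :: q) := by
      conv_lhs => rw [hsplit]
      simp only [cntp, hos, List.countP_append, List.countP_cons, List.countP_map]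
      simp only [Function.comp_def]
      omega
    rw [hc]
    omega
  rw [query_eq_avRest _ _ _ H, avRest_eq]
  have hmsup : msup w.toList os
      = (words.take k ++ words.drop (k + 1)).foldl
          (fun m v => max m (lcpL (w.toList) v.toList)) 0 := by
    have h1 : (words.take k ++ words.drop (k + 1)).foldl
        (fun m v => max m (lcpL (w.toList) v.toList)) 0
        = ((words.take k ++ words.drop (k + 1)).map (fun v => lcpL w.toList v.toList)).foldl max 0 := by
      rw [List.foldl_map]
    rw [h1, foldl_max_eq _ 0 le_rfl]
    have h2 : (words.take k ++ words.drop (k + 1)).map (fun v => lcpL w.toList v.toList)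
        = os.map (lcpL w.toList) := by
      simp [hos, List.map_map, Function.comp_def]
    rw [h2]
    have h3 := msup_nonneg w.toList os
    rw [msup] at h3 ⊢
    rw [max_eq_right h3]
  rw [hmsup, PySem.Str.len_eq]

-- ===== VERDICT (by name: the statement is the Claim_ definition above) =====
theorem solution_spec : Claim_equal_solution := by
  intro words _ hpre
  unfold Spec_solution solution solution_alt
  simp only [PySem.List.len_eq, PySem.List.pyRange_zero_natCast]
  rw [PySem.List.foldl_add, List.foldl_map, PySem.List.foldl_add]
  simp only [zero_add]
  refine congrArg (fun l : List Int => l.sum) (List.ext_getElem ?_ ?_)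
  · simp
  · intro k h1 h2
    simp only [List.getElem_map, List.getElem_range]
    have hk : k < words.length := by simpa using h1
    have hget : PySem.List.pyGetD words ((k : Int)) "" = words[k] := by
      rw [PySem.List.pyGetD_natCast]
      exact List.getD_eq_getElem words "" hk
    have hne : words[k] ≠ "" := hpre _ (List.getElem_mem hk)
    obtain ⟨c₀, rest, hlist⟩ : ∃ c₀ rest, words[k].toList = c₀ :: rest := by
      cases hv : words[k].toList with
      | nil => exact absurd (toList_nil_eq_empty _ hv) hne
      | cons c₀ rest => exact ⟨c₀, rest, rfl⟩
    have hpg : PySem.Str.pyGet? words[k] 0 = some c₀ := by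
      simp [pysem, hlist, PySem.List.pyGet?, PySem.List.pyIdx?]
    have hsl1 : PySem.List.slice words none (some ((k : Int))) = words.take k :=
      PySem.List.slice_to_natCast words k
    have hsl2 : PySem.List.slice words (some ((k : Int) + 1)) none = words.drop (k + 1) := by
      have : ((k : Int) + 1) = ((k + 1 : Nat) : Int) := by push_cast; ring
      rw [this, PySem.List.slice_from_natCast]
    rw [hget, hsl1, hsl2]
    split
    · next heq =>
        rw [hpg] at heq
        cases heq
    · next c heq =>
        rw [hpg] at heq
        cases heq
        rw [guard_fold c₀ rest (words[k]) hlist _ 0 le_rfl]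
        exact per_index words k hk
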